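-- pv_equiv track=rewrite | github.com/Heir-of-God/Project-S | HackerRank/PreparationKits/3months/Week5/8 sansa_and_xor.py | sansaXor
-- ===== SOURCE A (Python) =====
-- def sansaXor(arr: list[int]) -> int:
--     n: int = len(arr)
--     res = 0
--
--     for cur_ind in range(n):
--         start_choices: int = cur_ind + 1
--         end_choices: int = n - cur_ind
--         subarrays_count: int = start_choices * end_choices
--
--         if subarrays_count & 1 == 1:
--             res ^= arr[cur_ind]
--
--     return res
-- ===== SOURCE B (Python) =====
-- def sansaXor(arr: list[int]) -> int:
--     # n even => every element lies in an even number of subarrays => answer 0;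
--     # n odd  => exactly the even-indexed elements occur an odd number of times.
--     n = len(arr)
--     if n % 2 == 0:
--         return 0
--     res = 0
--     i = 0
--     while i < n:
--         res ^= arr[i]
--         i += 2
--     return res
-- ===== Notes on version B (the rewrite author's own statement) =====
-- stated objective: simpler
-- what changed: B replaces A's per-index subarray-count parity test with the closed form: return 0 immediately when len(arr) is even, otherwise XOR only the even-indexed elements by stepping the index two at a time.
import Mathlib
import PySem

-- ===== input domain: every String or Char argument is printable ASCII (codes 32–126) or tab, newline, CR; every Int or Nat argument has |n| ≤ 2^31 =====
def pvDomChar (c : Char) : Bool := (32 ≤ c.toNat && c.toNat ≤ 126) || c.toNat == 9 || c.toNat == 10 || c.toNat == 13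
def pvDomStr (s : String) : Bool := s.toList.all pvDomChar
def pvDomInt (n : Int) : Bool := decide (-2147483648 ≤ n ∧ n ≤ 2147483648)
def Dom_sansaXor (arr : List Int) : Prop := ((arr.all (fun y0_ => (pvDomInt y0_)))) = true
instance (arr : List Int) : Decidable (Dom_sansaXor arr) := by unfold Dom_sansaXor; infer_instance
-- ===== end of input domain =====

-- B returns 0 outright for even-length input and otherwise XORs only the even-indexed
-- elements with an index loop stepping by 2, instead of A's per-index parity test (simpler).

-- ===== PORT A =====
def sansaXor (arr : List Int) : Int :=
  let n : Int := PySem.List.len arr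
  (PySem.List.pyRange 0 n 1).foldl
    (fun res cur_ind =>
      let start_choices : Int := cur_ind + 1
      let end_choices : Int := n - cur_ind
      let subarrays_count : Int := start_choices * end_choices
      if PySem.Int.band subarrays_count 1 == 1 then
        PySem.Int.bxor res (PySem.List.pyGetD arr cur_ind 0)
      else res)
    0

-- ===== PORT B =====
-- the 'while i < n:' loop of Source B: res ^= arr[i]; i += 2
def sansaXorLoop (arr : List Int) (n : Int) (i res : Int) : Int :=
  if i < n then sansaXorLoop arr n (i + 2) (PySem.Int.bxor res (PySem.List.pyGetD arr i 0))
  else res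
  termination_by (n - i).toNat
  decreasing_by omega

def sansaXor_alt (arr : List Int) : Int :=
  let n : Int := PySem.List.len arr
  if PySem.Int.mod n 2 == 0 then 0
  else sansaXorLoop arr n 0 0

-- ===== PRECONDITION & SPEC =====
def Spec_sansaXor (arr : List Int) (out : Int) : Prop := out = sansaXor_alt arr
instance (arr : List Int) (out : Int) : Decidable (Spec_sansaXor arr out) := by unfold Spec_sansaXor; infer_instance

-- ===== CLAIM (what is proved, stated in full; the proofs are below) =====
def Claim_equal_sansaXor : Prop := ∀ (arr : List Int), Dom_sansaXor arr → Spec_sansaXor arr (sansaXor arr)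

-- ===== LEMMAS AND PROOFS =====

-- proof-side normal form of B's loop: walk the list, XOR the head, skip one
def evLoop : List Int → Int → Int
  | [], res => res
  | x :: t, res => evLoop (t.drop 1) (PySem.Int.bxor res x)
  termination_by l _ => l.length
  decreasing_by simp

theorem evLoop_nil (res : Int) : evLoop [] res = res := by simp [evLoop]
theorem evLoop_cons (x : Int) (t : List Int) (res : Int) :
    evLoop (x :: t) res = evLoop (t.drop 1) (PySem.Int.bxor res x) := by simp [evLoop]

-- A's loop body, folded over an explicit (index, element) list
def foldAE (n : Int) (ps : List (Int × Int)) (res : Int) : Int :=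
  ps.foldl
    (fun acc p =>
      if PySem.Int.band ((p.1 + 1) * (n - p.1)) 1 == 1 then PySem.Int.bxor acc p.2 else acc)
    res

-- (cur_ind+1)*(n-cur_ind) is odd exactly when cur_ind is even and n is odd
theorem cond_eq (n i : Int) :
    (PySem.Int.band ((i + 1) * (n - i)) 1 == 1) = (decide (i % 2 = 0) && decide (n % 2 = 1)) := by
  rw [PySem.Int.band_one]
  have hm : PySem.Int.mod ((i + 1) * (n - i)) 2 = ((i + 1) * (n - i)) % 2 := by
    simp [PySem.Int.mod, Int.fmod_eq_emod]
  rw [hm, Int.mul_emod]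
  rcases Int.emod_two_eq i with hi | hi <;> rcases Int.emod_two_eq n with hn | hn <;>
    [ (have e1 : (i + 1) % 2 = 1 := by omega
       have e2 : (n - i) % 2 = 0 := by omega);
      (have e1 : (i + 1) % 2 = 1 := by omega
       have e2 : (n - i) % 2 = 1 := by omega);
      (have e1 : (i + 1) % 2 = 0 := by omega
       have e2 : (n - i) % 2 = 1 := by omega);
      (have e1 : (i + 1) % 2 = 0 := by omega
       have e2 : (n - i) % 2 = 0 := by omega)] <;>
    rw [e1, e2] <;> simp [hi, hn]

theorem foldAE_even (n : Int) (hn : n % 2 = 0) :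
    ∀ (t : List Int) (s res : Int), foldAE n (PySem.List.enumerate t s) res = res := by
  intro t
  induction t with
  | nil => intro s res; simp [PySem.List.enumerate_nil, foldAE]
  | cons x t ih =>
      intro s res
      rw [PySem.List.enumerate_cons]
      simp only [foldAE, List.foldl_cons, cond_eq, hn]
      rw [if_neg (by simp)]
      have h2 := ih (s + 1) res
      simp only [foldAE, cond_eq, hn] at h2
      exact h2

theorem foldAE_odd (n : Int) (hn : n % 2 = 1) :
    ∀ (t : List Int) (s res : Int),
      foldAE n (PySem.List.enumerate t s) res =
        if s % 2 = 0 then evLoop t res else evLoop (t.drop 1) res := by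
  intro t
  induction t with
  | nil => intro s res; simp [PySem.List.enumerate_nil, foldAE, evLoop_nil]
  | cons x t ih =>
      intro s res
      rw [PySem.List.enumerate_cons]
      simp only [foldAE, List.foldl_cons, cond_eq, hn, decide_true, Bool.and_true]
      by_cases hs : s % 2 = 0
      · rw [if_pos (decide_eq_true hs)]
        have h2 := ih (s + 1) (PySem.Int.bxor res x)
        rw [if_neg (by omega)] at h2
        simp only [foldAE, cond_eq, hn, decide_true, Bool.and_true] at h2
        rw [h2, if_pos hs, evLoop_cons]
      · rw [if_neg (by simp [hs])]
        have h2 := ih (s + 1) res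
        rw [if_pos (by omega)] at h2
        simp only [foldAE, cond_eq, hn, decide_true, Bool.and_true] at h2
        rw [h2, if_neg hs]
        simp

theorem sansaXor_eq_foldAE (arr : List Int) :
    sansaXor arr = foldAE (PySem.List.len arr) (PySem.List.enumerate arr 0) 0 := by
  rw [foldAE, PySem.List.enumerate_eq_map_pyRange (d := 0), List.foldl_map]
  rfl

-- B's indexed loop equals the list walk from position i onwards
theorem sansaXorLoop_eq (arr : List Int) :
    ∀ (m : Nat) (i res : Int), 0 ≤ i → (arr.length : Int) - i ≤ (m : Int) →
      sansaXorLoop arr ((arr.length : Int)) i res = evLoop (arr.drop i.toNat) res := by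
  intro m
  induction m with
  | zero =>
      intro i res hi hm
      rw [sansaXorLoop, if_neg (by omega)]
      rw [List.drop_eq_nil_of_le (by omega), evLoop_nil]
  | succ m ih =>
      intro i res hi hm
      by_cases h : i < (arr.length : Int)
      · rw [sansaXorLoop, if_pos h]
        have hlt : i.toNat < arr.length := by omega
        have hd : arr.drop i.toNat = arr[i.toNat] :: arr.drop (i.toNat + 1) :=
          List.drop_eq_getElem_cons hlt
        have hget : PySem.List.pyGetD arr i 0 = arr[i.toNat] := by
          exact PySem.List.pyGetD_eq_getElem arr 0 hi (by simpa using h)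
        rw [ih (i + 2) (PySem.Int.bxor res (PySem.List.pyGetD arr i 0)) (by omega) (by omega),
            hd, evLoop_cons, hget]
        congr 1
        rw [List.drop_drop]
        congr 1
        omega
      · rw [sansaXorLoop, if_neg h]
        rw [List.drop_eq_nil_of_le (by omega), evLoop_nil]

theorem sansaXor_spec : Claim_equal_sansaXor := by
  intro arr _
  unfold Spec_sansaXor sansaXor_alt
  have hlen : PySem.List.len arr = (arr.length : Int) := by simp
  simp only [hlen]
  by_cases h : (arr.length : Int) % 2 = 0
  · have hb : (PySem.Int.mod ((arr.length : Int)) 2 == 0) = true := by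
      simp [PySem.Int.mod, Int.fmod_eq_emod, h]
    rw [if_pos hb, sansaXor_eq_foldAE, hlen, foldAE_even _ h]
  · have h1 : (arr.length : Int) % 2 = 1 := by omega
    have hb : ¬ (PySem.Int.mod ((arr.length : Int)) 2 == 0) = true := by
      simp [PySem.Int.mod, Int.fmod_eq_emod, h1]
    rw [if_neg hb, sansaXor_eq_foldAE, hlen, foldAE_odd _ h1 arr 0 0, if_pos (by norm_num),
        sansaXorLoop_eq arr arr.length 0 0 le_rfl (by omega)]
    simp
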